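-- pv_equiv track=rewrite | github.com/XEDGit/AdventOfCode2021 | days.py | light_neighbors
-- ===== SOURCE A (Python) =====
-- def light_neighbors(x, y, octo_map, c=0):
--     neighbours = [-1, 0, 1]
--     for a in neighbours:
--         for b in neighbours:
--             if a != 0 or b != 0:
--                 newx = x + b
--                 newy = y + a
--                 if 0 <= newx < len(octo_map[0]) and 0 <= newy < len(octo_map):
--                     if octo_map[newy][newx] is not -1:
--                         octo_map[newy][newx] += 1
--                         if octo_map[newy][newx] > 9:
--                             c += 1
--                             octo_map[newy][newx] = -1
--                             c += light_neighbors(newx, newy, octo_map)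
--     return c
-- ===== SOURCE B (Python) =====
-- def light_neighbors(x, y, octo_map, c=0):
--     # Iterative version: the recursion is replaced by an explicit stack of
--     # frames (cell, remaining neighbour offsets); same mutation of octo_map.
--     offsets = [(a, b) for a in (-1, 0, 1) for b in (-1, 0, 1)]
--     total = c
--     stack = [(x, y, offsets)]
--     while stack:
--         cx, cy, rem = stack.pop()
--         if not rem:
--             continue
--         (a, b), rest = rem[0], rem[1:]
--         if a != 0 or b != 0:
--             nx = cx + b
--             ny = cy + a
--             if 0 <= nx < len(octo_map[0]) and 0 <= ny < len(octo_map):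
--                 v = octo_map[ny][nx]
--                 if v != -1:
--                     if v + 1 > 9:
--                         total += 1
--                         octo_map[ny][nx] = -1
--                         stack.append((cx, cy, rest))
--                         stack.append((nx, ny, offsets))
--                         continue
--                     octo_map[ny][nx] = v + 1
--         stack.append((cx, cy, rest))
--     return total
-- ===== Notes on version B (the rewrite author's own statement) =====
-- stated objective: alternative
-- what changed: The recursive flash cascade is replaced by an iterative worklist machine: an explicit stack of frames (cell, remaining neighbour offsets) processed in a while loop, so no Python recursion (and no recursion-depth limit) is involved; octo_map is mutated the same way.
-- outside the precondition, e.g. on light_neighbors(0, 0, [[1, 1], [1, 1], [9]], 0): A returns 0, B returns 0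
import Mathlib
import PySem

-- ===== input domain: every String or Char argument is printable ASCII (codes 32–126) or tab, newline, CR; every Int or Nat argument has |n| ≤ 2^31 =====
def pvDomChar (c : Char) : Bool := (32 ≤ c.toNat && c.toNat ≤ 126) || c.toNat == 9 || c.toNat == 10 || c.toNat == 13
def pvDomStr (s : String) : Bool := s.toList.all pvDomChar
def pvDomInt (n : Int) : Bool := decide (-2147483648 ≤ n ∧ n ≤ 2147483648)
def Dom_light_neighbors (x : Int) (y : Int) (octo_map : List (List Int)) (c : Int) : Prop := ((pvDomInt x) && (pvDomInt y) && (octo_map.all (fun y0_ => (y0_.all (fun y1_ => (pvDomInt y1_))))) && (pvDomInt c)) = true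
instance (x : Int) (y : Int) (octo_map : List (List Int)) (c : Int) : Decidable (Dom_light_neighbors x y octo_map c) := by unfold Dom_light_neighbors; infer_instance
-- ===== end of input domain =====

-- B replaces the recursive flash cascade by an iterative worklist machine (explicit stack of
-- frames: cell + remaining neighbour offsets) processing neighbours in the same order; the
-- in-place mutation of octo_map performed by both Pythons is identical, and the theorems here
-- are about the RETURN value (the count).

-- ===== PORT A =====
-- shared read/write primitives (both Pythons do `octo_map[ny][nx]` reads and assignments):
-- an out-of-range read (impossible under Pre_, where the grid is at least row-0 rectangular)
-- is given the value -1, which makes the port skip that cell; exact under Pre_.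
def pvGet2 (m : List (List Int)) (yv xv : Int) : Int :=
  match PySem.List.pyGet? m yv with
  | none => -1
  | some row => (PySem.List.pyGet? row xv).getD (-1)

def pvSet2 (m : List (List Int)) (yv xv val : Int) : List (List Int) :=
  m.mapIdx (fun i row => if (i : Int) = yv then row.mapIdx (fun j w => if (j : Int) = xv then val else w) else row)

-- neighbours = [-1, 0, 1]; the two nested `for` loops enumerate the 9 pairs (a, b)
def pvNeighbours : List Int := [-1, 0, 1]
def pvAllPairs : List (Int × Int) := pvNeighbours.flatMap (fun a => pvNeighbours.map (fun b => (a, b)))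

-- number of cells ≠ -1: an upper bound on the number of flashes, used only as fuel
def pvLive (m : List (List Int)) : Nat := (m.map (fun row => row.countP (fun v => v ≠ -1))).sum

-- literal transliteration of A's body: structural recursion over the remaining (a, b) pairs,
-- threading the mutated map and c; `fuel` (one more than the number of still-flashable cells,
-- which strictly decreases at every flash) only makes the recursion total and never runs out.
def pvGoA (f : Nat) (offs : List (Int × Int)) (x y : Int) (m : List (List Int)) (c : Int) :
    List (List Int) × Int :=
  match f, offs with
  | 0, _ => (m, c)
  | _ + 1, [] => (m, c)
  | f + 1, (a, b) :: rest =>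
    if a ≠ 0 ∨ b ≠ 0 then
      let newx := x + b
      let newy := y + a
      if 0 ≤ newx ∧ newx < ((m.headD []).length : Int) ∧ 0 ≤ newy ∧ newy < (m.length : Int) then
        let v := pvGet2 m newy newx
        -- `is not -1` on CPython's cached small ints ≡ `!= -1`
        if v ≠ -1 then
          let m1 := pvSet2 m newy newx (v + 1)
          if v + 1 > 9 then
            let m2 := pvSet2 m1 newy newx (-1)
            let r := pvGoA f pvAllPairs newx newy m2 0
            pvGoA f rest x y r.1 (c + 1 + r.2)
          else pvGoA (f + 1) rest x y m1 c
        else pvGoA (f + 1) rest x y m c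
      else pvGoA (f + 1) rest x y m c
    else pvGoA (f + 1) rest x y m c
  termination_by (f, offs.length)
  decreasing_by
    all_goals simp_wf
    all_goals omega

def light_neighbors (x : Int) (y : Int) (octo_map : List (List Int)) (c : Int) : Int :=
  (pvGoA (pvLive octo_map + 1) pvAllPairs x y octo_map c).2

-- ===== PORT B =====
-- a frame is (fuel, cx, cy, remaining offsets); fuel is the Lean totality artifact (never
-- exhausted on admitted inputs), the rest is exactly Source B's stack entry
def pvFrame : Type := Nat × Int × Int × List (Int × Int)

def pvW (S : List pvFrame) : Nat := (S.map (fun fr => (fr.2.2.2.length + 2) * 9 ^ fr.1)).sum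

def pvRunB (S : List pvFrame) (m : List (List Int)) (t : Int) : List (List Int) × Int :=
  match S with
  | [] => (m, t)
  | (0, _, _, _) :: S' => pvRunB S' m t
  | (_ + 1, _, _, []) :: S' => pvRunB S' m t
  | (fc + 1, cx, cy, (a, b) :: rest) :: S' =>
    if a ≠ 0 ∨ b ≠ 0 then
      let nx := cx + b
      let ny := cy + a
      if 0 ≤ nx ∧ nx < ((m.headD []).length : Int) ∧ 0 ≤ ny ∧ ny < (m.length : Int) then
        let v := pvGet2 m ny nx
        if v ≠ -1 then
          if v + 1 > 9 then
            pvRunB ((fc, nx, ny, pvAllPairs) :: (fc, cx, cy, rest) :: S') (pvSet2 m ny nx (-1)) (t + 1)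
          else pvRunB ((fc + 1, cx, cy, rest) :: S') (pvSet2 m ny nx (v + 1)) t
        else pvRunB ((fc + 1, cx, cy, rest) :: S') m t
      else pvRunB ((fc + 1, cx, cy, rest) :: S') m t
    else pvRunB ((fc + 1, cx, cy, rest) :: S') m t
  termination_by pvW S
  decreasing_by
    all_goals simp [pvW, pvAllPairs, pvNeighbours, pow_succ]
    all_goals nlinarith [Nat.one_le_two_pow (n := 0), pow_pos (show 0 < 9 by norm_num) fc]

def light_neighbors_alt (x : Int) (y : Int) (octo_map : List (List Int)) (c : Int) : Int :=
  (pvRunB [(pvLive octo_map + 1, x, y, pvAllPairs)] octo_map c).2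

-- ===== PRECONDITION & SPEC =====
-- Pre_ admits (a) grids whose rows are all at least as long as row 0 (non-empty), and
-- (b) inputs whose start cell is so far outside the grid that no cell is ever touched.
-- It excludes inputs on which the Pythons' chained indexing raises IndexError (empty or
-- ragged grids with a reachable short cell), and also ragged grids with an adjacent start
-- on which A happens to return because the short cells are never reached by the cascade:
-- reachability is not a closed-form condition (see cites).
def Pre_light_neighbors (x : Int) (y : Int) (octo_map : List (List Int)) (c : Int) : Prop :=
  (octo_map = [] ∧ x < -1) ∨
  (octo_map ≠ [] ∧
    ((∀ row ∈ octo_map, (octo_map.headD []).length ≤ row.length) ∨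
      x < -1 ∨ x > ((octo_map.headD []).length : Int) ∨ y < -1 ∨ y > (octo_map.length : Int)))
instance (x : Int) (y : Int) (octo_map : List (List Int)) (c : Int) : Decidable (Pre_light_neighbors x y octo_map c) := by unfold Pre_light_neighbors; infer_instance

def pvWitness_light_neighbors : Int × Int × List (List Int) × Int := (0, 0, [[9, 1], [1, 1]], 0)

def Spec_light_neighbors (x : Int) (y : Int) (octo_map : List (List Int)) (c : Int) (out : Int) : Prop := out = light_neighbors_alt x y octo_map c
instance (x : Int) (y : Int) (octo_map : List (List Int)) (c : Int) (out : Int) : Decidable (Spec_light_neighbors x y octo_map c out) := by unfold Spec_light_neighbors; infer_instance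

-- ===== CLAIM (what is proved, stated in full; the proofs are below) =====
def Claim_equal_light_neighbors : Prop := ∀ (x : Int) (y : Int) (octo_map : List (List Int)) (c : Int), Dom_light_neighbors x y octo_map c → Pre_light_neighbors x y octo_map c → Spec_light_neighbors x y octo_map c (light_neighbors x y octo_map c)

-- ===== LEMMAS AND PROOFS =====

theorem pvW_cons (f : Nat) (x y : Int) (rem : List (Int × Int)) (S : List pvFrame) :
    pvW ((f, x, y, rem) :: S) = (rem.length + 2) * 9 ^ f + pvW S := by
  simp [pvW]

-- overwriting the same cell twice keeps only the second value (A writes v+1 then -1 on a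
-- flash, B writes -1 directly)
theorem pvSet2_overwrite (m : List (List Int)) (yv xv u w : Int) :
    pvSet2 (pvSet2 m yv xv u) yv xv w = pvSet2 m yv xv w := by
  unfold pvSet2
  rw [List.mapIdx_mapIdx, List.mapIdx_eq_mapIdx_iff]
  intro i hi
  by_cases hy : (i : Int) = yv
  · simp only [Function.comp_apply, if_pos hy]
    rw [List.mapIdx_mapIdx, List.mapIdx_eq_mapIdx_iff]
    intro j hj
    by_cases hx : (j : Int) = xv <;> simp [hx]
  · simp [Function.comp_apply, hy]

-- the count returned by pvGoA is c plus a contribution independent of c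
theorem pvGoA_add (f : Nat) : ∀ (offs : List (Int × Int)) (x y : Int) (m : List (List Int)) (c : Int),
    pvGoA f offs x y m c = ((pvGoA f offs x y m 0).1, c + (pvGoA f offs x y m 0).2) := by
  induction f with
  | zero => intro offs x y m c; simp [pvGoA]
  | succ f ih =>
    intro offs
    induction offs with
    | nil => intro x y m c; simp [pvGoA]
    | cons p rest ihr =>
      intro x y m c
      obtain ⟨a, b⟩ := p
      rw [pvGoA, pvGoA]
      dsimp only
      split_ifs with h1 h2 h3 h4
      · rw [ih, ih rest x y _ (0 + 1 + _)]
        simp only [Prod.mk.injEq, true_and]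
        ring
      · rw [ihr]
      · rw [ihr]
      · rw [ihr]
      · rw [ihr]

-- simulation: running the machine on a top frame equals running pvGoA for that frame and
-- continuing with the rest of the stack
theorem pvSim (n : Nat) : ∀ (f : Nat) (rem : List (Int × Int)) (x y : Int) (S' : List pvFrame)
    (m : List (List Int)) (t : Int), pvW ((f, x, y, rem) :: S') ≤ n →
    pvRunB ((f, x, y, rem) :: S') m t
      = pvRunB S' (pvGoA f rem x y m 0).1 (t + (pvGoA f rem x y m 0).2) := by
  induction n with
  | zero =>
    intro f rem x y S' m t hS
    exfalso
    have h9 : 1 ≤ 9 ^ f := Nat.one_le_pow _ _ (by norm_num)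
    rw [pvW_cons] at hS
    nlinarith
  | succ n ih =>
    intro f rem x y S' m t hS
    match f, rem with
    | 0, rem => simp [pvRunB, pvGoA]
    | f + 1, [] => simp [pvRunB, pvGoA]
    | f + 1, (a, b) :: rest =>
      have h9 : 1 ≤ 9 ^ f := Nat.one_le_pow _ _ (by norm_num)
      rw [pvW_cons, pow_succ] at hS
      simp only [List.length_cons] at hS
      simp only [pvRunB, pvGoA]
      split_ifs with h1 h2 h3 h4
      · -- flash: the machine pushes the new frame and the continuation frame
        rw [pvSet2_overwrite]
        rw [ih f pvAllPairs _ _ ((f, x, y, rest) :: S') _ _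
              (by
                have hA : pvAllPairs.length = 9 := rfl
                rw [pvW_cons, pvW_cons, hA]; nlinarith)]
        rw [ih f rest x y S' _ _ (by rw [pvW_cons]; nlinarith)]
        rw [pvGoA_add f rest x y _ (0 + 1 + _)]
        dsimp only
        congr 1
        ring
      · rw [ih (f + 1) rest x y S' _ _ (by rw [pvW_cons, pow_succ]; nlinarith)]
      · rw [ih (f + 1) rest x y S' _ _ (by rw [pvW_cons, pow_succ]; nlinarith)]
      · rw [ih (f + 1) rest x y S' _ _ (by rw [pvW_cons, pow_succ]; nlinarith)]
      · rw [ih (f + 1) rest x y S' _ _ (by rw [pvW_cons, pow_succ]; nlinarith)]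

-- ===== VERDICT (by name: the statement is the Claim_ definition above) =====
theorem light_neighbors_spec : Claim_equal_light_neighbors := by
  intro x y octo_map c _ _
  unfold Spec_light_neighbors light_neighbors light_neighbors_alt
  rw [pvSim (pvW [(pvLive octo_map + 1, x, y, pvAllPairs)]) _ _ _ _ _ _ _ le_rfl]
  rw [pvGoA_add]
  simp [pvRunB]
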